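-- pv_equiv track=rewrite | github.com/phusitsom/01204111-Computer-and-Programming-CPE35 | Ext/CU/Solution/07_StrFile/[07_StrFile_32] 07_StrFile_★★★_Password_Strength.py | number_sequence
-- ===== SOURCE A (Python) =====
-- def number_sequence(t):
--     n = '0123456789'
--     for i in range(len(t) - 3):
--         if t[i] in n and t[i + 1] in n and t[i + 2] in n and t[i + 3] in n:
--             if (int(t[i]) + 3) % 10 == (int(t[i + 1]) + 2) % 10 == (int(t[i + 2]) + 1) % 10 == (int(t[i + 3])) % 10:
--                 return True
--             if (int(t[i])) % 10 == (int(t[i + 1]) + 1) % 10 == (int(t[i + 2]) + 2) % 10 == (int(t[i + 3]) + 3) % 10: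
--                 return True
--     return False
-- ===== SOURCE B (Python) =====
-- def number_sequence(t):
--     asc = 0
--     desc = 0
--     prev = -1  # -1: previous char is not a digit
--     for ch in t:
--         if ch in '0123456789':
--             d = int(ch)
--             asc = asc + 1 if prev >= 0 and d == (prev + 1) % 10 else 0
--             desc = desc + 1 if prev >= 0 and d == (prev + 9) % 10 else 0
--             if asc >= 3 or desc >= 3:
--                 return True
--             prev = d
--         else:
--             asc = 0
--             desc = 0
--             prev = -1
--     return False
-- ===== Notes on version B (the rewrite author's own statement) =====
-- stated objective: alternative
-- what changed: Replaced A's sliding window that re-tests four indexed characters and two chained mod-10 equalities per position with a single left-to-right pass keeping two run-length counters (ascending and descending digit steps mod 10) that returns as soon as a run of three steps is seen.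
import Mathlib
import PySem

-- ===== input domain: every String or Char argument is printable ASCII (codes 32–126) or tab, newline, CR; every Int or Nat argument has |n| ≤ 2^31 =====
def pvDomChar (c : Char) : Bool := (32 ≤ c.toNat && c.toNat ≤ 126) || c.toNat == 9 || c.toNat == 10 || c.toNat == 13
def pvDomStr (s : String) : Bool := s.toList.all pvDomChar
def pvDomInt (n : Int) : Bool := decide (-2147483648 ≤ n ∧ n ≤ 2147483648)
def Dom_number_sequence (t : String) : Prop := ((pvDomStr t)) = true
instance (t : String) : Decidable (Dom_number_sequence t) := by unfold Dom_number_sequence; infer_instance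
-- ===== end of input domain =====

-- B replaces A's sliding window of four indexed characters by a single left-to-right
-- pass keeping two run-length counters (ascending/descending steps mod 10); objective: alternative (same O(n) cost, often a modest constant-factor gain).

-- ===== PORT A =====

-- `c in '0123456789'`
def pyIsDigitChar (c : Char) : Bool := ("0123456789".toList).contains c

-- `int(t[i])` for a single digit character (exact there); `% 10` below is Int.emod,
-- which agrees with Python's `%` for the positive divisor 10.
def pyDigitVal (c : Char) : Int := (c.toNat : Int) - 48

-- the body of A's loop at one window t[i..i+3]
def condA (a b c d : Char) : Bool :=
  pyIsDigitChar a && pyIsDigitChar b && pyIsDigitChar c && pyIsDigitChar d &&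
  (((((pyDigitVal a + 3) % 10 == (pyDigitVal b + 2) % 10) &&
     ((pyDigitVal b + 2) % 10 == (pyDigitVal c + 1) % 10) &&
     ((pyDigitVal c + 1) % 10 == (pyDigitVal d) % 10))) ||
   ((((pyDigitVal a) % 10 == (pyDigitVal b + 1) % 10) &&
     ((pyDigitVal b + 1) % 10 == (pyDigitVal c + 2) % 10) &&
     ((pyDigitVal c + 2) % 10 == (pyDigitVal d + 3) % 10))))

-- `for i in range(len(t) - 3)`: the suffix starting at i carries the window t[i..i+3]
def nsA_loop : List Char → Bool
  | a :: b :: c :: d :: r => condA a b c d || nsA_loop (b :: c :: d :: r)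
  | _ => false

def number_sequence (t : String) : Bool := nsA_loop t.toList

-- ===== PORT B =====

-- the for-loop of Source B with state (asc, desc, prev)
def nsB_loop : List Char → Int → Int → Int → Bool
  | [], _, _, _ => false
  | ch :: r, asc, desc, prev =>
    if pyIsDigitChar ch then
      let d := pyDigitVal ch
      let asc' := if prev ≥ 0 && d == (prev + 1) % 10 then asc + 1 else 0
      let desc' := if prev ≥ 0 && d == (prev + 9) % 10 then desc + 1 else 0
      if asc' ≥ 3 || desc' ≥ 3 then true
      else nsB_loop r asc' desc' d
    else nsB_loop r 0 0 (-1)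

def number_sequence_alt (t : String) : Bool := nsB_loop t.toList 0 0 (-1)

-- ===== PRECONDITION & SPEC =====
def Spec_number_sequence (t : String) (out : Bool) : Prop := out = number_sequence_alt t
instance (t : String) (out : Bool) : Decidable (Spec_number_sequence t out) := by unfold Spec_number_sequence; infer_instance

-- ===== CLAIM (what is proved, stated in full; the proofs are below) =====
def Claim_equal_number_sequence : Prop := ∀ (t : String), Dom_number_sequence t → Spec_number_sequence t (number_sequence t)

-- ===== LEMMAS AND PROOFS =====

-- step flags for one adjacent pair of characters
def flagA (a b : Char) : Bool :=
  pyIsDigitChar a && pyIsDigitChar b && (pyDigitVal b == (pyDigitVal a + 1) % 10)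
def flagD (a b : Char) : Bool :=
  pyIsDigitChar a && pyIsDigitChar b && (pyDigitVal b == (pyDigitVal a + 9) % 10)

def pairs : List Char → List (Bool × Bool)
  | a :: b :: r => (flagA a b, flagD a b) :: pairs (b :: r)
  | _ => []

def hasWin3 : List (Bool × Bool) → Bool
  | p :: q :: r :: rest => (p.1 && q.1 && r.1 || p.2 && q.2 && r.2) || hasWin3 (q :: r :: rest)
  | _ => false

def hasWin : List Bool → Bool
  | a :: b :: c :: rest => (a && b && c) || hasWin (b :: c :: rest)
  | _ => false

-- the flag stream B's loop walks, given the incoming prev state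
def pairFlags : Int → List Char → List (Bool × Bool)
  | _, [] => []
  | prev, ch :: r =>
    if pyIsDigitChar ch then
      ((decide (prev ≥ 0) && (pyDigitVal ch == (prev + 1) % 10)),
       (decide (prev ≥ 0) && (pyDigitVal ch == (prev + 9) % 10))) :: pairFlags (pyDigitVal ch) r
    else (false, false) :: pairFlags (-1) r

theorem digit_bounds (c : Char) (h : pyIsDigitChar c = true) :
    0 ≤ pyDigitVal c ∧ pyDigitVal c < 10 := by
  have hm : c ∈ ['0','1','2','3','4','5','6','7','8','9'] := by
    have e : "0123456789".toList = ['0','1','2','3','4','5','6','7','8','9'] := rfl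
    rw [pyIsDigitChar, e] at h
    exact List.mem_of_elem_eq_true h
  simp only [List.mem_cons, List.not_mem_nil, or_false] at hm
  rcases hm with h|h|h|h|h|h|h|h|h|h <;> subst h <;> decide

theorem condA_eq_flags (a b c d : Char) :
    condA a b c d
      = ((flagA a b && flagA b c && flagA c d) || (flagD a b && flagD b c && flagD c d)) := by
  by_cases ha : pyIsDigitChar a = true
  · by_cases hb : pyIsDigitChar b = true
    · by_cases hc : pyIsDigitChar c = true
      · by_cases hd : pyIsDigitChar d = true
        · obtain ⟨ha0, ha1⟩ := digit_bounds a ha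
          obtain ⟨hb0, hb1⟩ := digit_bounds b hb
          obtain ⟨hc0, hc1⟩ := digit_bounds c hc
          obtain ⟨hd0, hd1⟩ := digit_bounds d hd
          simp only [condA, flagA, flagD, ha, hb, hc, hd, Bool.true_and]
          rw [Bool.eq_iff_iff]
          simp only [Bool.or_eq_true, Bool.and_eq_true, beq_iff_eq]
          omega
        · simp [condA, flagA, flagD, hd]
      · simp [condA, flagA, flagD, hc]
    · simp [condA, flagA, flagD, hb]
  · simp [condA, flagA, flagD, ha]

theorem nsA_eq_hasWin3 (cs : List Char) : nsA_loop cs = hasWin3 (pairs cs) := by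
  fun_induction nsA_loop cs with
  | case1 a b c d r ih =>
      rw [ih, condA_eq_flags]
      simp [pairs, hasWin3]
  | case2 cs h =>
      rcases cs with _|⟨a,_|⟨b,_|⟨c,_|⟨d,r⟩⟩⟩⟩
      · rfl
      · rfl
      · rfl
      · rfl
      · exact absurd rfl (h a b c d r)

theorem hasWin3_split (ps : List (Bool × Bool)) :
    hasWin3 ps = (hasWin (ps.map Prod.fst) || hasWin (ps.map Prod.snd)) := by
  fun_induction hasWin3 ps with
  | case1 p q r rest ih =>
      simp only [List.map, hasWin, ih]
      cases p.1 <;> cases q.1 <;> cases r.1 <;> cases p.2 <;> cases q.2 <;> cases r.2 <;>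
        cases hasWin (r.1 :: rest.map Prod.fst) <;> cases hasWin (r.2 :: rest.map Prod.snd) <;> simp
  | case2 ps h =>
      rcases ps with _|⟨p,_|⟨q,_|⟨r,rest⟩⟩⟩
      · rfl
      · rfl
      · rfl
      · exact absurd rfl (h p q r rest)

theorem hasWin_pad (l : List Bool) (b : Bool) (c : Nat) (hc : c ≤ 2) :
    hasWin (List.replicate c true ++ b :: l)
      = if b then (if c + 1 ≥ 3 then true else hasWin (List.replicate (c + 1) true ++ l))
        else hasWin l := by
  interval_cases c <;> cases b <;>
    (simp only [List.replicate, List.nil_append, List.cons_append]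
     cases l with
     | nil => rfl
     | cons x r => cases r with
       | nil => rfl
       | cons y r' => simp [hasWin])

theorem nsB_eq_pad (cs : List Char) : ∀ (asc desc : Nat) (prev : Int), asc ≤ 2 → desc ≤ 2 →
    nsB_loop cs (asc : Int) (desc : Int) prev
      = (hasWin (List.replicate asc true ++ (pairFlags prev cs).map Prod.fst)
         || hasWin (List.replicate desc true ++ (pairFlags prev cs).map Prod.snd)) := by
  induction cs with
  | nil =>
      intro asc desc prev ha hd
      simp only [nsB_loop, pairFlags, List.map, List.append_nil]
      interval_cases asc <;> interval_cases desc <;> rfl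
  | cons ch r ih =>
      intro asc desc prev ha hd
      by_cases hdig : pyIsDigitChar ch = true
      · simp only [nsB_loop, hdig, if_pos]
        set b1 : Bool := decide (prev ≥ 0) && (pyDigitVal ch == (prev + 1) % 10) with hb1
        set b2 : Bool := decide (prev ≥ 0) && (pyDigitVal ch == (prev + 9) % 10) with hb2
        have hpf : pairFlags prev (ch :: r) = (b1, b2) :: pairFlags (pyDigitVal ch) r := by
          simp [pairFlags, hdig, hb1, hb2]
        rw [hpf]
        simp only [List.map]
        rw [hasWin_pad _ b1 asc ha, hasWin_pad _ b2 desc hd]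
        cases hb1' : b1 <;> cases hb2' : b2
        · -- b1 = false, b2 = false
          have h' := ih 0 0 (pyDigitVal ch) (by omega) (by omega)
          simp only [Nat.cast_zero, List.replicate_zero, List.nil_append] at h'
          simp [h']
        · -- b1 = false, b2 = true
          by_cases h3 : desc = 2
          · subst h3; norm_num
          · have h' := ih 0 (desc + 1) (pyDigitVal ch) (by omega) (by omega)
            push_cast at h'
            simp only [List.nil_append] at h'
            simp only [Bool.false_eq_true, if_false, if_true]
            rw [if_neg (by omega : ¬ (desc + 1 ≥ 3))]
            rw [if_neg (by simp; omega : ¬ ((decide ((0:Int) ≥ 3) || decide ((↑desc + 1 : Int) ≥ 3)) = true))]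
            simpa using h'
        · -- b1 = true, b2 = false
          by_cases h3 : asc = 2
          · subst h3; norm_num
          · have h' := ih (asc + 1) 0 (pyDigitVal ch) (by omega) (by omega)
            push_cast at h'
            simp only [List.nil_append] at h'
            simp only [Bool.false_eq_true, if_false, if_true]
            rw [if_neg (by omega : ¬ (asc + 1 ≥ 3))]
            rw [if_neg (by simp; omega : ¬ ((decide ((↑asc + 1 : Int) ≥ 3) || decide ((0:Int) ≥ 3)) = true))]
            simpa using h'
        · -- b1 = true, b2 = true
          by_cases h3 : asc = 2 ∨ desc = 2
          · rcases h3 with h3 | h3 <;> subst h3 <;> norm_num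
          · rw [not_or] at h3
            have h' := ih (asc + 1) (desc + 1) (pyDigitVal ch) (by omega) (by omega)
            push_cast at h'
            simp only [if_true]
            rw [if_neg (by omega : ¬ (asc + 1 ≥ 3)), if_neg (by omega : ¬ (desc + 1 ≥ 3))]
            rw [if_neg (by simp; omega : ¬ ((decide ((↑asc + 1 : Int) ≥ 3) || decide ((↑desc + 1 : Int) ≥ 3)) = true))]
            exact h'
      · simp only [nsB_loop, hdig]
        have hpf : pairFlags prev (ch :: r) = (false, false) :: pairFlags (-1) r := by
          simp [pairFlags, hdig]
        rw [hpf]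
        simp only [List.map]
        rw [hasWin_pad _ false asc ha, hasWin_pad _ false desc hd]
        have := ih 0 0 (-1) (by omega) (by omega)
        simpa using this

theorem pairFlags_eq_pairs (r : List Char) : ∀ (a : Char),
    pairFlags (if pyIsDigitChar a then pyDigitVal a else -1) r = pairs (a :: r) := by
  induction r with
  | nil => intro a; cases h : pyIsDigitChar a <;> simp [pairFlags, pairs]
  | cons b r' ih =>
      intro a
      by_cases hb : pyIsDigitChar b = true
      · have tail := ih b
        rw [if_pos hb] at tail
        by_cases ha : pyIsDigitChar a = true
        · have ⟨h0, _⟩ := digit_bounds a ha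
          simp only [if_pos ha, pairFlags, hb, if_pos]
          rw [tail]
          simp [pairs, flagA, flagD, ha, hb, h0]
        · simp only [if_neg ha, pairFlags, hb, if_pos]
          rw [tail]
          simp [pairs, flagA, flagD, ha]
      · have tail := ih b
        rw [if_neg hb] at tail
        cases h : pyIsDigitChar a <;>
          · simp only [h, if_true, pairFlags, hb]
            rw [tail]
            simp [pairs, flagA, flagD, hb, h]

theorem hasWin_false_cons (l : List Bool) : hasWin (false :: l) = hasWin l := by
  rcases l with _|⟨x,_|⟨y,r⟩⟩
  · rfl
  · rfl
  · simp [hasWin]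

theorem pairFlags_neg_one (cs : List Char) :
    (hasWin ((pairFlags (-1) cs).map Prod.fst) || hasWin ((pairFlags (-1) cs).map Prod.snd))
      = hasWin3 (pairs cs) := by
  rw [hasWin3_split]
  cases cs with
  | nil => rfl
  | cons a r =>
      have hpf : pairFlags (-1) (a :: r) = (false, false) :: pairs (a :: r) := by
        cases h : pyIsDigitChar a
        · have h2 := pairFlags_eq_pairs r a
          rw [h] at h2
          simp only [Bool.false_eq_true, if_false] at h2
          simp [pairFlags, h, h2]
        · have h2 := pairFlags_eq_pairs r a
          rw [h] at h2
          simp only [if_true] at h2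
          simp [pairFlags, h, h2]
      rw [hpf]
      simp only [List.map]
      rw [hasWin_false_cons, hasWin_false_cons]

-- ===== VERDICT (by name: the statement is the Claim_ definition above) =====
theorem number_sequence_spec : Claim_equal_number_sequence := by
  intro t _
  show number_sequence t = number_sequence_alt t
  have hB := nsB_eq_pad t.toList 0 0 (-1) (by omega) (by omega)
  simp only [Nat.cast_zero, List.replicate_zero, List.nil_append] at hB
  rw [number_sequence, number_sequence_alt, nsA_eq_hasWin3, hB, pairFlags_neg_one]
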